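-- pv_equiv track=rewrite | github.com/RMWinslow/RMWinslow.github.io | games/mahjongPokerProbabilityCAlc.py | analyzeMiniMahjongHand
-- ===== SOURCE A (Python) =====
-- def maxRun(listofnums):
--     listofnums = sorted(listofnums)
--     if len(listofnums) <= 1:
--         return listofnums
--     maxRun = [listofnums[0]]
--     currentRun = maxRun = [listofnums[0]]
--     for entry in listofnums[1:]:
--         if entry == currentRun[-1] + 1:
--             currentRun.append(entry)
--             if len(currentRun) > len(maxRun):
--                 maxRun = currentRun
--         elif entry == currentRun[-1]:
--             continue
--         else:
--             currentRun = [entry]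
--     return maxRun
--
-- def analyzeMiniMahjongHand(c1,c2,c3,c4,c5):
--     "Returns the highest poker hand type that matches"
--     '''
--     Pair = Two identical
--     Chow = flush run of three
--     Pung = three identical
--     kong = 4 identical
--     Pung+Chow
--     Pair+Chow
--     Pair+Pung
--     2 Pair
--     High
--     '''
--     #Check for straights
--     coinRanks = []
--     stringRanks  = []
--     wanRanks = []
--     for card in [c1,c2,c3,c4,c5]:
--         if card[0]=='C':
--             coinRanks.append(int(card[1]))
--         elif card[0]=='S':
--             stringRanks.append(int(card[1]))
--         elif card[0]=='M':
--             wanRanks.append(int(card[1]))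
--     coinRun = len(maxRun(coinRanks))
--     stringRun = len(maxRun(stringRanks))
--     wanRun = len(maxRun(wanRanks))
--
--     runFlag = False
--     if (coinRun >= 3 or stringRun >= 3 or wanRun >= 3):
--         runFlag = True
--
--     #check for identical sets
--     countcounts = [0,0,0,0,0,0]
--     cardset = set([c1,c2,c3,c4,c5])
--     for card in cardset:
--         countcounts[[c1,c2,c3,c4,c5].count(card)] += 1
--
--
--     if countcounts[4]:
--         return "Kong"
--     elif countcounts[3]:
--         if countcounts[2] == 1:
--             return "Pair+Pung"
--         if runFlag:
--             return "Pung+Chow"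
--         return "Pung"
--     elif runFlag:
--         if countcounts[2] == 1:
--             return "Pair+Chow"
--         return "Chow"
--     elif countcounts[2] == 2:
--         return "2 Pair"
--     elif countcounts[2]:
--         return "Pair"
--     else:
--         return "High"
-- ===== SOURCE B (Python) =====
-- from collections import Counter
--
-- def analyzeMiniMahjongHand(c1, c2, c3, c4, c5):
--     "Returns the highest poker hand type that matches"
--     cards = [c1, c2, c3, c4, c5]
--     # straight-of-three test: a suit holds some rank r with r+1 and r+2 as well
--     runFlag = False
--     for suit in "CSM":
--         ranks = {int(card[1]) for card in cards if card[0] == suit}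
--         if any(r + 1 in ranks and r + 2 in ranks for r in ranks):
--             runFlag = True
--     groups = list(Counter(cards).values())
--     pairs = groups.count(2)
--     if 4 in groups:
--         return "Kong"
--     if 3 in groups:
--         if pairs == 1:
--             return "Pair+Pung"
--         return "Pung+Chow" if runFlag else "Pung"
--     if runFlag:
--         return "Pair+Chow" if pairs == 1 else "Chow"
--     if pairs == 2:
--         return "2 Pair"
--     if pairs == 1:
--         return "Pair"
--     return "High"
-- ===== Notes on version B (the rewrite author's own statement) =====
-- stated objective: simpler
-- what changed: Replaces the sort-and-scan maxRun longest-run tracker with a direct straight-of-three existence test on each suit's rank set (r, r+1, r+2 all present), and replaces the hand-rolled count-of-counts table over set(cards) with collections.Counter group sizes.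
import Mathlib
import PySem

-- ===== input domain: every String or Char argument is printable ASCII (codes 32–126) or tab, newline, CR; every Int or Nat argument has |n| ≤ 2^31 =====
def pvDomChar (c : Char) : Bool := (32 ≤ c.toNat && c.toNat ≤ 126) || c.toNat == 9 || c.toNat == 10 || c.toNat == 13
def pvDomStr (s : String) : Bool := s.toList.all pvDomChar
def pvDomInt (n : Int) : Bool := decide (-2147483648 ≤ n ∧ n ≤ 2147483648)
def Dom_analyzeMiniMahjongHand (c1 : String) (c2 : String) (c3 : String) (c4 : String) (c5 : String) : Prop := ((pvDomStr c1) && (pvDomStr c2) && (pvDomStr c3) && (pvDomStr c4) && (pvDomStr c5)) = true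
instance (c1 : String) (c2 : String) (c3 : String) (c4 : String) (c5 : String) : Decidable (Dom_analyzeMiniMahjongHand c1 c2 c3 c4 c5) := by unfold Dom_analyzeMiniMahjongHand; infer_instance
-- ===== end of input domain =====

-- B replaces A's sort-and-scan longest-run helper by a direct straight-of-three set-membership test
-- and A's hand-rolled count-of-counts table by Counter group sizes (objective: simpler).

-- int(card[1]) for a single ASCII digit character; Pre_ guarantees the character is a digit wherever it is used
def pvDigit (d : Char) : Int := (d.toNat : Int) - 48

-- ===== PORT A =====
-- the loop body of A's rank-extraction 'for card in [c1..c5]' (card[0] tested against 'C'/'S'/'M';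
-- the empty-string case is card[0]'s IndexError, excluded by Pre_; int(card[1]) is pvDigit of the
-- second character, total here, exact under Pre_)
def pvRankStep (acc : List Int × List Int × List Int) (card : String) : List Int × List Int × List Int :=
  match card.toList with
  | [] => acc
  | ch :: rest =>
    if ch = 'C' then (acc.1 ++ [pvDigit (rest.headD '0')], acc.2.1, acc.2.2)
    else if ch = 'S' then (acc.1, acc.2.1 ++ [pvDigit (rest.headD '0')], acc.2.2)
    else if ch = 'M' then (acc.1, acc.2.1, acc.2.2 ++ [pvDigit (rest.headD '0')])
    else acc

-- maxRun's scan loop; Python's aliasing 'currentRun = maxRun = [x]' with in-place append yields the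
-- same list VALUES as this value-passing version (whenever cur grows past best, best becomes cur)
def pvMaxRunGo (best cur : List Int) : List Int → List Int
  | [] => best
  | e :: rest =>
    if e = PySem.List.pyGetD cur (-1) 0 + 1 then
      let cur' := cur ++ [e]
      pvMaxRunGo (if best.length < cur'.length then cur' else best) cur' rest
    else if e = PySem.List.pyGetD cur (-1) 0 then
      pvMaxRunGo best cur rest
    else
      pvMaxRunGo best [e] rest

-- maxRun after the reassignment 'listofnums = sorted(listofnums)': the body on the sorted list
def pvMaxRunSorted (s : List Int) : List Int :=
  if s.length ≤ 1 then s
  else pvMaxRunGo [PySem.List.pyGetD s 0 0] [PySem.List.pyGetD s 0 0] (PySem.List.slice s (some 1) none)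

def pvMaxRun (l : List Int) : List Int :=
  pvMaxRunSorted (PySem.List.sorted l (fun x => x) false)

def analyzeMiniMahjongHand (c1 : String) (c2 : String) (c3 : String) (c4 : String) (c5 : String) : String :=
  let cards := [c1, c2, c3, c4, c5]
  let tri := cards.foldl pvRankStep ([], [], [])
  let coinRun := PySem.List.len (pvMaxRun tri.1)
  let stringRun := PySem.List.len (pvMaxRun tri.2.1)
  let wanRun := PySem.List.len (pvMaxRun tri.2.2)
  let runFlag := if 3 ≤ coinRun ∨ 3 ≤ stringRun ∨ 3 ≤ wanRun then true else false
  let cardset := PySem.Set.ofList cards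
  let countcounts := cardset.foldl
    (fun cc card =>
      PySem.List.pySetD cc ((cards.count card : Int))
        (PySem.List.pyGetD cc ((cards.count card : Int)) 0 + 1))
    ([0, 0, 0, 0, 0, 0] : List Int)
  if PySem.List.pyGetD countcounts 4 0 ≠ 0 then "Kong"
  else if PySem.List.pyGetD countcounts 3 0 ≠ 0 then
    (if PySem.List.pyGetD countcounts 2 0 = 1 then "Pair+Pung"
     else if runFlag then "Pung+Chow" else "Pung")
  else if runFlag then
    (if PySem.List.pyGetD countcounts 2 0 = 1 then "Pair+Chow" else "Chow")
  else if PySem.List.pyGetD countcounts 2 0 = 2 then "2 Pair"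
  else if PySem.List.pyGetD countcounts 2 0 ≠ 0 then "Pair"
  else "High"

-- ===== PORT B =====
-- B's comprehension '[int(card[1]) for card in cards if card[0] == suit]' (before the set is formed)
def pvRanksOf (suit : Char) (cards : List String) : List Int :=
  (cards.filter (fun c => c.toList.headD ' ' = suit)).map (fun c => pvDigit (c.toList.tail.headD '0'))

def analyzeMiniMahjongHand_alt (c1 : String) (c2 : String) (c3 : String) (c4 : String) (c5 : String) : String :=
  let cards := [c1, c2, c3, c4, c5]
  let runFlag := ("CSM".toList).foldl
    (fun fl suit =>
      let ranks : PySem.Set Int := PySem.Set.ofList (pvRanksOf suit cards)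
      if ranks.any (fun r => decide ((r + 1) ∈ ranks) && decide ((r + 2) ∈ ranks)) then true else fl)
    false
  let groups := (PySem.Dict.counter cards).values
  let pairs := groups.count 2
  if (4 : Int) ∈ groups then "Kong"
  else if (3 : Int) ∈ groups then
    (if pairs = 1 then "Pair+Pung"
     else if runFlag then "Pung+Chow" else "Pung")
  else if runFlag then
    (if pairs = 1 then "Pair+Chow" else "Chow")
  else if pairs = 2 then "2 Pair"
  else if pairs = 1 then "Pair"
  else "High"

-- ===== PRECONDITION & SPEC =====
-- a card raises iff it is empty (card[0]: IndexError) or starts with 'C'/'S'/'M' without an ASCII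
-- digit as second character (card[1]: IndexError / int: ValueError); Pre_ admits exactly the rest
def pvCardOK (s : String) : Bool :=
  match s.toList with
  | [] => false
  | c :: rest =>
    if c = 'C' ∨ c = 'S' ∨ c = 'M' then
      match rest with
      | d :: _ => 48 ≤ d.toNat && d.toNat ≤ 57
      | [] => false
    else true

-- Pre_ excludes exactly the inputs on which the Python A raises (IndexError/ValueError), nothing else
def Pre_analyzeMiniMahjongHand (c1 : String) (c2 : String) (c3 : String) (c4 : String) (c5 : String) : Prop :=
  (pvCardOK c1 && pvCardOK c2 && pvCardOK c3 && pvCardOK c4 && pvCardOK c5) = true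
instance (c1 : String) (c2 : String) (c3 : String) (c4 : String) (c5 : String) : Decidable (Pre_analyzeMiniMahjongHand c1 c2 c3 c4 c5) := by unfold Pre_analyzeMiniMahjongHand; infer_instance

def pvWitness_analyzeMiniMahjongHand : String × String × String × String × String :=
  ("C1", "C2", "C3", "S5", "S5")

def Spec_analyzeMiniMahjongHand (c1 : String) (c2 : String) (c3 : String) (c4 : String) (c5 : String) (out : String) : Prop := out = analyzeMiniMahjongHand_alt c1 c2 c3 c4 c5
instance (c1 : String) (c2 : String) (c3 : String) (c4 : String) (c5 : String) (out : String) : Decidable (Spec_analyzeMiniMahjongHand c1 c2 c3 c4 c5 out) := by unfold Spec_analyzeMiniMahjongHand; infer_instance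

-- ===== CLAIM (what is proved, stated in full; the proofs are below) =====
def Claim_equal_analyzeMiniMahjongHand : Prop := ∀ (c1 : String) (c2 : String) (c3 : String) (c4 : String) (c5 : String), Dom_analyzeMiniMahjongHand c1 c2 c3 c4 c5 → Pre_analyzeMiniMahjongHand c1 c2 c3 c4 c5 → Spec_analyzeMiniMahjongHand c1 c2 c3 c4 c5 (analyzeMiniMahjongHand c1 c2 c3 c4 c5)

-- ===== LEMMAS AND PROOFS =====

theorem pvWitness_ok :
    Dom_analyzeMiniMahjongHand pvWitness_analyzeMiniMahjongHand.1 pvWitness_analyzeMiniMahjongHand.2.1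
      pvWitness_analyzeMiniMahjongHand.2.2.1 pvWitness_analyzeMiniMahjongHand.2.2.2.1
      pvWitness_analyzeMiniMahjongHand.2.2.2.2 ∧
    Pre_analyzeMiniMahjongHand pvWitness_analyzeMiniMahjongHand.1 pvWitness_analyzeMiniMahjongHand.2.1
      pvWitness_analyzeMiniMahjongHand.2.2.1 pvWitness_analyzeMiniMahjongHand.2.2.2.1
      pvWitness_analyzeMiniMahjongHand.2.2.2.2 := by decide

-- a run of consecutive integers starting at a, of length k
def pvChain (a : Int) (k : Nat) : List Int := (List.range k).map (fun (i : Nat) => a + (i : Int))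

theorem mem_pvChain {x a : Int} {k : Nat} : x ∈ pvChain a k ↔ a ≤ x ∧ x < a + k := by
  constructor
  · intro hx
    obtain ⟨i, hi, rfl⟩ := List.mem_map.mp hx
    rw [List.mem_range] at hi
    omega
  · intro h
    exact List.mem_map.mpr ⟨(x - a).toNat, by rw [List.mem_range]; omega, by omega⟩

theorem length_pvChain (a : Int) (k : Nat) : (pvChain a k).length = k := by
  simp [pvChain]

theorem pvChain_snoc (a : Int) (k : Nat) : pvChain a (k + 1) = pvChain a k ++ [a + k] := by
  simp [pvChain, List.range_succ]

theorem pvChain_one (a : Int) : pvChain a 1 = [a] := by simp [pvChain]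

theorem pvChain_last (a : Int) (k : Nat) :
    PySem.List.pyGetD (pvChain a (k + 1)) (-1) 0 = a + k := by
  rw [pvChain_snoc]
  exact PySem.List.pyGetD_neg_one_append_singleton _ _ _

theorem pvMaxRunGo_mono : ∀ (rest best cur : List Int),
    best.length ≤ (pvMaxRunGo best cur rest).length := by
  intro rest
  induction rest with
  | nil => intro best cur; simp [pvMaxRunGo]
  | cons e rest ih =>
    intro best cur
    simp only [pvMaxRunGo]
    split_ifs with h1 h3 h2
    · exact le_trans (le_of_lt h3) (ih _ _)
    · exact ih _ _
    · exact ih _ _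
    · exact ih _ _

theorem pvMaxRunGo_sound : ∀ (rest : List Int) (b a : Int) (m k : Nat),
    ∃ b' m', pvMaxRunGo (pvChain b (m + 1)) (pvChain a (k + 1)) rest = pvChain b' (m' + 1) ∧
      ∀ x ∈ pvChain b' (m' + 1), x ∈ pvChain b (m + 1) ∨ x ∈ pvChain a (k + 1) ∨ x ∈ rest := by
  intro rest
  induction rest with
  | nil =>
    intro b a m k
    exact ⟨b, m, rfl, fun x hx => Or.inl hx⟩
  | cons e rest ih =>
    intro b a m k
    simp only [pvMaxRunGo, pvChain_last]
    split_ifs with h1 h3 h2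
    · -- e = a + k + 1, best grows to cur'
      have hcur : pvChain a (k + 1) ++ [e] = pvChain a (k + 1 + 1) := by
        rw [pvChain_snoc a (k + 1)]
        have he' : e = a + ((k + 1 : Nat) : Int) := by push_cast; omega
        rw [he']
      rw [hcur]
      have hsub : ∀ x ∈ pvChain a (k + 1 + 1), x ∈ pvChain a (k + 1) ∨ x = e := by
        intro x hx
        rw [mem_pvChain] at hx
        by_cases hxe : x = e
        · exact Or.inr hxe
        · left; rw [mem_pvChain]; push_cast at hx ⊢; omega
      obtain ⟨b', m', heq, hmem⟩ := ih a a (k + 1) (k + 1)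
      refine ⟨b', m', heq, fun x hx => ?_⟩
      rcases hmem x hx with h | h | h
      · rcases hsub x h with h' | h' <;> simp [h']
      · rcases hsub x h with h' | h' <;> simp [h']
      · simp [h]
    · -- e = a + k + 1, best kept
      have hcur : pvChain a (k + 1) ++ [e] = pvChain a (k + 1 + 1) := by
        rw [pvChain_snoc a (k + 1)]
        have he' : e = a + ((k + 1 : Nat) : Int) := by push_cast; omega
        rw [he']
      rw [hcur]
      have hsub : ∀ x ∈ pvChain a (k + 1 + 1), x ∈ pvChain a (k + 1) ∨ x = e := by
        intro x hx
        rw [mem_pvChain] at hx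
        by_cases hxe : x = e
        · exact Or.inr hxe
        · left; rw [mem_pvChain]; push_cast at hx ⊢; omega
      obtain ⟨b', m', heq, hmem⟩ := ih b a m (k + 1)
      refine ⟨b', m', heq, fun x hx => ?_⟩
      rcases hmem x hx with h | h | h
      · exact Or.inl h
      · rcases hsub x h with h' | h' <;> simp [h']
      · simp [h]
    · -- e = a + k, duplicate
      obtain ⟨b', m', heq, hmem⟩ := ih b a m k
      refine ⟨b', m', heq, fun x hx => ?_⟩
      rcases hmem x hx with h | h | h <;> simp [h]
    · -- break: cur = [e] = pvChain e 1
      have he : [e] = pvChain e (0 + 1) := by rw [pvChain_one]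
      rw [he]
      obtain ⟨b', m', heq, hmem⟩ := ih b e m 0
      refine ⟨b', m', heq, fun x hx => ?_⟩
      rcases hmem x hx with h | h | h
      · exact Or.inl h
      · rw [pvChain_one, List.mem_singleton] at h; simp [h]
      · simp [h]

theorem pvMaxRunGo_complete : ∀ (rest : List Int) (b a : Int) (m k : Nat),
    rest.Pairwise (· ≤ ·) → (∀ x ∈ rest, a + k ≤ x) → k ≤ m →
    (∃ r, (r ∈ pvChain a (k + 1) ∨ r ∈ rest) ∧ (r + 1 ∈ pvChain a (k + 1) ∨ r + 1 ∈ rest) ∧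
          (r + 2 ∈ pvChain a (k + 1) ∨ r + 2 ∈ rest)) →
    3 ≤ (pvMaxRunGo (pvChain b (m + 1)) (pvChain a (k + 1)) rest).length := by
  intro rest
  induction rest with
  | nil =>
    intro b a m k _ _ hkm ⟨r, hr, hr1, hr2⟩
    simp only [List.not_mem_nil, or_false] at hr hr1 hr2
    rw [mem_pvChain] at hr hr1 hr2
    simp only [pvMaxRunGo, length_pvChain]
    omega
  | cons e rest ih =>
    intro b a m k hsorted hge hkm htriple
    have hpw := (List.pairwise_cons.mp hsorted)
    have hge_e : a + k ≤ e := hge e (List.mem_cons_self ..)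
    simp only [pvMaxRunGo, pvChain_last]
    split_ifs with h1 h3 h2
    case pos =>
      -- e = a + k + 1, best grows
      have hcur : pvChain a (k + 1) ++ [e] = pvChain a (k + 1 + 1) := by
        rw [pvChain_snoc a (k + 1)]
        have he' : e = a + ((k + 1 : Nat) : Int) := by push_cast; omega
        rw [he']
      rw [hcur]
      refine ih a a (k + 1) (k + 1) hpw.2
        (by intro x hx; have := hpw.1 x hx; push_cast; omega) le_rfl ?_
      obtain ⟨r, hr, hr1, hr2⟩ := htriple
      have f : ∀ x : Int, (x ∈ pvChain a (k + 1) ∨ x ∈ e :: rest) →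
          (x ∈ pvChain a (k + 1 + 1) ∨ x ∈ rest) := by
        intro x hx
        rcases hx with hx | hx
        · left; rw [mem_pvChain] at hx ⊢; push_cast at hx ⊢; omega
        · rcases List.mem_cons.mp hx with hx | hx
          · left; rw [mem_pvChain]; push_cast; omega
          · exact Or.inr hx
      exact ⟨r, f r hr, f _ hr1, f _ hr2⟩
    case neg =>
      -- e = a + k + 1, best kept (so k + 1 ≤ m)
      rw [length_pvChain, List.length_append, length_pvChain] at h3
      have hcur : pvChain a (k + 1) ++ [e] = pvChain a (k + 1 + 1) := by
        rw [pvChain_snoc a (k + 1)]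
        have he' : e = a + ((k + 1 : Nat) : Int) := by push_cast; omega
        rw [he']
      rw [hcur]
      refine ih b a m (k + 1) hpw.2
        (by intro x hx; have := hpw.1 x hx; push_cast; omega) (by simp at h3; omega) ?_
      obtain ⟨r, hr, hr1, hr2⟩ := htriple
      have f : ∀ x : Int, (x ∈ pvChain a (k + 1) ∨ x ∈ e :: rest) →
          (x ∈ pvChain a (k + 1 + 1) ∨ x ∈ rest) := by
        intro x hx
        rcases hx with hx | hx
        · left; rw [mem_pvChain] at hx ⊢; push_cast at hx ⊢; omega
        · rcases List.mem_cons.mp hx with hx | hx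
          · left; rw [mem_pvChain]; push_cast; omega
          · exact Or.inr hx
      exact ⟨r, f r hr, f _ hr1, f _ hr2⟩
    case pos =>
      -- e = a + k, duplicate
      refine ih b a m k hpw.2 (fun x hx => le_trans hge_e (hpw.1 x hx)) hkm ?_
      obtain ⟨r, hr, hr1, hr2⟩ := htriple
      have f : ∀ x : Int, (x ∈ pvChain a (k + 1) ∨ x ∈ e :: rest) →
          (x ∈ pvChain a (k + 1) ∨ x ∈ rest) := by
        intro x hx
        rcases hx with hx | hx
        · exact Or.inl hx
        · rcases List.mem_cons.mp hx with hx | hx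
          · left; rw [mem_pvChain]; push_cast; omega
          · exact Or.inr hx
      exact ⟨r, f r hr, f _ hr1, f _ hr2⟩
    case neg =>
      -- break: e ≥ a + k + 2
      have he2 : a + k + 2 ≤ e := by omega
      obtain ⟨r, hr, hr1, hr2⟩ := htriple
      by_cases hcase : r + 2 ∈ pvChain a (k + 1)
      · -- whole triple inside cur ⇒ k ≥ 2 ⇒ best already long enough
        have hb2 := mem_pvChain.mp hcase
        have hrc : r ∈ pvChain a (k + 1) := by
          rcases hr with h | h
          · exact h
          · exfalso
            rcases List.mem_cons.mp h with h' | h'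
            · omega
            · have := hpw.1 r h'; push_cast at hb2; omega
        have hrc1 : r + 1 ∈ pvChain a (k + 1) := by
          rcases hr1 with h | h
          · exact h
          · exfalso
            rcases List.mem_cons.mp h with h' | h'
            · omega
            · have := hpw.1 (r + 1) h'; push_cast at hb2; omega
        have h1' := mem_pvChain.mp hrc
        have hk2 : 2 ≤ k := by push_cast at hb2 h1'; omega
        calc (3 : Nat) ≤ m + 1 := by omega
          _ = (pvChain b (m + 1)).length := (length_pvChain b (m + 1)).symm
          _ ≤ _ := pvMaxRunGo_mono _ _ _
      · -- triple lies beyond the break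
        have hr2' : r + 2 ∈ e :: rest := by tauto
        have hr2e : e ≤ r + 2 := by
          rcases List.mem_cons.mp hr2' with h | h
          · omega
          · exact (hpw.1 _ h)
        have hnotchain : ∀ x : Int, a + k < x → x ∈ pvChain a (k + 1) → False := by
          intro x hlt hx; have := mem_pvChain.mp hx; push_cast at this; omega
        have hr' : r ∈ e :: rest := by
          rcases hr with h | h
          · exfalso
            have hra := mem_pvChain.mp h
            have : r = a + k := by push_cast at hra; omega
            have hmem1 : r + 1 ∈ e :: rest := by
              rcases hr1 with h' | h'
              · exact absurd h' (fun hh => hnotchain _ (by omega) hh)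
              · exact h'
            rcases List.mem_cons.mp hmem1 with h' | h'
            · omega
            · have := hpw.1 _ h'; omega
          · exact h
        have hr1' : r + 1 ∈ e :: rest := by
          rcases hr1 with h | h
          · exfalso
            have := mem_pvChain.mp h
            have hre : e ≤ r := by
              rcases List.mem_cons.mp hr' with h' | h'
              · omega
              · exact hpw.1 _ h'
            push_cast at this; omega
          · exact h
        have he1 : [e] = pvChain e (0 + 1) := by rw [pvChain_one]
        rw [he1]
        have conv : ∀ x : Int, x ∈ e :: rest → (x ∈ pvChain e (0 + 1) ∨ x ∈ rest) := by
          intro x hx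
          rcases List.mem_cons.mp hx with h | h
          · left; rw [pvChain_one]; simp [h]
          · exact Or.inr h
        exact ih b e m 0 hpw.2
          (by intro x hx; have := hpw.1 x hx; push_cast; omega) (by omega)
          ⟨r, conv r hr', conv _ hr1', conv _ hr2'⟩

-- characterisation of A's maxRun: a run of length ≥ 3 exists iff some r with r, r+1, r+2 all present
theorem pvMaxRun_three_iff (l : List Int) :
    3 ≤ (pvMaxRun l).length ↔ ∃ r ∈ l, r + 1 ∈ l ∧ r + 2 ∈ l := by
  unfold pvMaxRun
  have hperm : (PySem.List.sorted l (fun x => x) false).Perm l := PySem.List.sorted_perm l _ _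
  have hpw : (PySem.List.sorted l (fun x => x) false).Pairwise (fun a b => a ≤ b) := by
    simpa using PySem.List.sorted_pairwise l (fun x => x)
  generalize hsn : PySem.List.sorted l (fun x => x) false = s at hperm hpw ⊢
  rcases s with - | ⟨x, s'⟩
  · constructor
    · intro h; simp [pvMaxRunSorted] at h
    · rintro ⟨r, hr, -, -⟩
      rw [← hperm.mem_iff] at hr; cases hr
  rcases s' with - | ⟨y, t⟩
  · constructor
    · intro h; simp [pvMaxRunSorted] at h
    · rintro ⟨r, hr, hr1, -⟩
      rw [← hperm.mem_iff] at hr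
      rw [← hperm.mem_iff] at hr1
      simp at hr hr1; omega
  · have hpwc := List.pairwise_cons.mp hpw
    have hrw : pvMaxRunSorted (x :: y :: t) =
        pvMaxRunGo (pvChain x (0 + 1)) (pvChain x (0 + 1)) (y :: t) := by
      rw [pvMaxRunSorted, if_neg (by simp), PySem.List.pyGetD_zero_cons,
        PySem.List.slice_from_one, List.tail_cons, pvChain_one]
    rw [hrw]
    have memiff : ∀ z : Int, z ∈ l ↔ (z ∈ pvChain x (0 + 1) ∨ z ∈ y :: t) := by
      intro z
      rw [← hperm.mem_iff, pvChain_one]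
      simp [List.mem_cons]
    constructor
    · intro h
      obtain ⟨b', m', heq, hmemb⟩ := pvMaxRunGo_sound (y :: t) x x 0 0
      rw [heq, length_pvChain] at h
      have trip : ∀ i : Nat, i < 3 → b' + (i : Int) ∈ l := by
        intro i hi
        have hin : b' + (i : Int) ∈ pvChain b' (m' + 1) := by
          rw [mem_pvChain]; push_cast; omega
        rw [memiff]
        rcases hmemb _ hin with hh | hh | hh
        · exact Or.inl hh
        · exact Or.inl hh
        · exact Or.inr hh
      refine ⟨b', by simpa using trip 0 (by omega), ?_, ?_⟩
      · have := trip 1 (by omega); push_cast at this; simpa using this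
      · have := trip 2 (by omega); push_cast at this; simpa using this
    · rintro ⟨r, hr, hr1, hr2⟩
      refine pvMaxRunGo_complete (y :: t) x x 0 0 hpwc.2
        (by intro z hz; have := hpwc.1 z hz; push_cast; omega) le_rfl
        ⟨r, (memiff r).mp hr, (memiff _).mp hr1, (memiff _).mp hr2⟩

-- A's rank-extraction loop computes, per suit, exactly B's comprehension pvRanksOf
theorem foldl_rankStep (cards : List String) : ∀ acc,
    cards.foldl pvRankStep acc =
      (acc.1 ++ pvRanksOf 'C' cards, acc.2.1 ++ pvRanksOf 'S' cards, acc.2.2 ++ pvRanksOf 'M' cards) := by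
  induction cards with
  | nil => intro acc; simp [pvRanksOf]
  | cons c cs ih =>
    intro acc
    rw [List.foldl_cons, ih]
    rcases hc : c.toList with - | ⟨ch, rest⟩
    · simp [pvRankStep, pvRanksOf, hc, List.head?_eq_getElem?]
    · by_cases h1 : ch = 'C'
      · subst h1; simp [pvRankStep, pvRanksOf, hc, List.head?_eq_getElem?]
      · by_cases h2 : ch = 'S'
        · subst h2; simp [pvRankStep, pvRanksOf, hc, List.head?_eq_getElem?]
        · by_cases h3 : ch = 'M'
          · subst h3; simp [pvRankStep, pvRanksOf, hc, h1, h2, List.head?_eq_getElem?]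
          · simp [pvRankStep, pvRanksOf, hc, h1, h2, h3]

-- A's countcounts loop: the table entry at k counts how many processed values equal k
theorem pvBumpFold : ∀ (L : List Nat) (cc : List Int) (k : Nat),
    (∀ n ∈ L, n < cc.length) → k < cc.length →
    (L.foldl (fun cc n => cc.set n (cc.getD n 0 + 1)) cc).getD k 0
      = cc.getD k 0 + (L.count k : Int) := by
  intro L
  induction L with
  | nil => intro cc k _ _; simp
  | cons n L ih =>
    intro cc k hb hk
    rw [List.foldl_cons,
      ih _ k (by intro m hm; rw [List.length_set]; exact hb m (List.mem_cons_of_mem _ hm))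
        (by rw [List.length_set]; exact hk)]
    have hn : n < cc.length := hb n (List.mem_cons_self ..)
    by_cases hkn : k = n
    · subst hkn
      simp only [List.getD_eq_getElem?_getD]
      rw [List.getElem?_set_self (by omega)]
      simp only [Option.getD_some, List.count_cons]
      simp
      omega
    · simp only [List.getD_eq_getElem?_getD]
      rw [List.getElem?_set_ne (by omega)]
      have : (n :: L).count k = L.count k := by simp [Ne.symm hkn]
      rw [this]

-- each occurrence of v contributes v to the sum
theorem pvCount_mul_le_sum (L : List Nat) (v : Nat) : v * L.count v ≤ L.sum := by
  induction L with
  | nil => simp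
  | cons a L ih =>
    by_cases h : a = v
    · subst h; simp [Nat.mul_add]; omega
    · have : (a :: L).count v = L.count v := by
        simp [List.count_cons]
        omega
      rw [this, List.sum_cons]; omega

-- ===== VERDICT (by name: the statement is the Claim_ definition above) =====
set_option maxHeartbeats 3000000 in
theorem analyzeMiniMahjongHand_spec : Claim_equal_analyzeMiniMahjongHand := by
  intro c1 c2 c3 c4 c5 _hdom _hpre
  unfold Spec_analyzeMiniMahjongHand
  simp only [analyzeMiniMahjongHand, analyzeMiniMahjongHand_alt]
  rw [foldl_rankStep]
  simp only [List.nil_append]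
  -- abbreviations
  set cards : List String := [c1, c2, c3, c4, c5] with hcards
  -- (I) the straight flags agree
  have hany : ∀ suit : Char,
      ((PySem.Set.ofList (pvRanksOf suit cards)).any
        (fun r => decide ((r + 1) ∈ PySem.Set.ofList (pvRanksOf suit cards)) &&
                  decide ((r + 2) ∈ PySem.Set.ofList (pvRanksOf suit cards))) = true) ↔
      (∃ r ∈ pvRanksOf suit cards, r + 1 ∈ pvRanksOf suit cards ∧ r + 2 ∈ pvRanksOf suit cards) := by
    intro suit
    simp [List.any_eq_true, PySem.Set.mem_ofList]
  -- (II) the multiplicity tables agree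
  have hV6 : ∀ n ∈ (PySem.Set.ofList cards).map (fun c => cards.count c), n < 6 := by
    intro n hn
    obtain ⟨c, -, rfl⟩ := List.mem_map.mp hn
    have := List.count_le_length (l := cards) (a := c)
    simp [hcards] at this ⊢
    omega
  have hcc : ∀ k : Nat, k < 6 →
      PySem.List.pyGetD
        ((PySem.Set.ofList cards).foldl
          (fun cc card =>
            PySem.List.pySetD cc ((cards.count card : Int))
              (PySem.List.pyGetD cc ((cards.count card : Int)) 0 + 1))
          [0, 0, 0, 0, 0, 0]) (k : Int) 0
      = (((PySem.Set.ofList cards).map (fun c => cards.count c)).count k : Int) := by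
    intro k hk
    simp only [PySem.List.pySetD_natCast, PySem.List.pyGetD_natCast]
    rw [← List.foldl_map (f := fun card : String => cards.count card)
      (g := fun (cc : List Int) (n : Nat) => cc.set n (cc.getD n 0 + 1))]
    rw [pvBumpFold _ _ k (by simpa using hV6) (by simp; omega)]
    have hz : ([0, 0, 0, 0, 0, 0] : List Int).getD k 0 = 0 := by
      interval_cases k <;> rfl
    rw [hz, zero_add]
  have h4 := hcc 4 (by omega)
  have h3 := hcc 3 (by omega)
  have h2 := hcc 2 (by omega)
  rw [show ((4 : Nat) : Int) = (4 : Int) from rfl] at h4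
  rw [show ((3 : Nat) : Int) = (3 : Int) from rfl] at h3
  rw [show ((2 : Nat) : Int) = (2 : Int) from rfl] at h2
  rw [h4, h3, h2]
  -- B's Counter group sizes are the same multiset of counts
  have hG : (PySem.Dict.counter cards).values
      = ((PySem.Set.ofList cards).map (fun c => cards.count c)).map (fun (n : Nat) => (n : Int)) := by
    simp only [PySem.Dict.values, PySem.Dict.items_counter, List.map_map]
    rfl
  rw [hG]
  set V : List Nat := (PySem.Set.ofList cards).map (fun c => cards.count c) with hVdef
  -- bound: at most two distinct cards can occur exactly twice among five
  have hVsum : V.sum = 5 := by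
    have hperm : (PySem.Set.ofList cards).Perm cards.dedup := by
      apply (List.perm_ext_iff_of_nodup (PySem.Set.nodup_ofList _) (List.nodup_dedup _)).mpr
      intro x
      simp [PySem.Set.mem_ofList, List.mem_dedup]
    have := (hperm.map (fun c => cards.count c)).sum_eq
    rw [hVdef, this, List.sum_map_count_dedup_eq_length]
    simp [hcards]
  have hp2 : V.count 2 ≤ 2 := by
    have := pvCount_mul_le_sum V 2
    omega
  -- translate B's membership / count conditions to V's counts
  have hm4 : ((4 : Int) ∈ V.map (fun (n : Nat) => (n : Int))) ↔ V.count 4 ≠ 0 := by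
    simp only [List.mem_map]
    constructor
    · rintro ⟨n, hn, he⟩
      have hn4 : n = 4 := by omega
      subst hn4
      have := List.count_pos_iff.mpr hn
      omega
    · intro h
      exact ⟨4, List.count_pos_iff.mp (by omega), rfl⟩
  have hm3 : ((3 : Int) ∈ V.map (fun (n : Nat) => (n : Int))) ↔ V.count 3 ≠ 0 := by
    simp only [List.mem_map]
    constructor
    · rintro ⟨n, hn, he⟩
      have hn3 : n = 3 := by omega
      subst hn3
      have := List.count_pos_iff.mpr hn
      omega
    · intro h
      exact ⟨3, List.count_pos_iff.mp (by omega), rfl⟩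
  have hinj : Function.Injective (fun n : Nat => (n : Int)) := fun a b h => by simpa using h
  have hcount2 : (V.map (fun (n : Nat) => (n : Int))).count 2 = V.count 2 := by
    simpa using List.count_map_of_injective V (fun n : Nat => (n : Int)) hinj 2
  have e4 : ((V.count 4 : Int) ≠ 0) ↔ V.count 4 ≠ 0 := by omega
  have e3 : ((V.count 3 : Int) ≠ 0) ↔ V.count 3 ≠ 0 := by omega
  have e1 : ((V.count 2 : Int) = 1) ↔ V.count 2 = 1 := by omega
  have e2 : ((V.count 2 : Int) = 2) ↔ V.count 2 = 2 := by omega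
  have e0 : ((V.count 2 : Int) ≠ 0) ↔ V.count 2 ≠ 0 := by omega
  simp only [hm4, hm3, hcount2, e4, e3, e1, e2, e0]
  have hCSMl : "CSM".toList = ['C', 'S', 'M'] := rfl
  have hq : V.count 2 = 0 ∨ V.count 2 = 1 ∨ V.count 2 = 2 := by omega
  rcases hq with q | q | q <;>
    by_cases tC : ∃ r ∈ pvRanksOf 'C' cards, r + 1 ∈ pvRanksOf 'C' cards ∧ r + 2 ∈ pvRanksOf 'C' cards <;>
      by_cases tS : ∃ r ∈ pvRanksOf 'S' cards, r + 1 ∈ pvRanksOf 'S' cards ∧ r + 2 ∈ pvRanksOf 'S' cards <;>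
        by_cases tW : ∃ r ∈ pvRanksOf 'M' cards, r + 1 ∈ pvRanksOf 'M' cards ∧ r + 2 ∈ pvRanksOf 'M' cards <;>
          simp [q, hCSMl, PySem.List.len_eq, pvMaxRun_three_iff, hany, tC, tS, tW]
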